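-- pv_equiv track=rewrite | github.com/zverinec/interlos-web | public/download/years/2021-interlosik/reseni/smenarny-solution.py | gen_mapping
-- ===== SOURCE A (Python) =====
-- from typing import Dict, Optional, List, Tuple, Set, Iterable, Any
--
-- def gen_mapping(options: List[str], lenght: int) -> List[List[str]]:
--     if lenght == 0:
--         return [[]]
--     shorter = gen_mapping(options, lenght - 1)
--     out: List[List[str]] = []
--     for opt in options:
--         for s in shorter:
--             out.append([opt] + s)
--     return out
-- ===== SOURCE B (Python) =====
-- def gen_mapping(options, lenght):
--     result = [[]]
--     for _ in range(lenght):
--         result = [[opt] + s for opt in options for s in result]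
--     return result
-- ===== Notes on version B (the rewrite author's own statement) =====
-- stated objective: simpler
-- what changed: Replaces the recursion by an iterative loop that repeatedly expands result = [[]] with one comprehension per level; no recursive calls.
import Mathlib
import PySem

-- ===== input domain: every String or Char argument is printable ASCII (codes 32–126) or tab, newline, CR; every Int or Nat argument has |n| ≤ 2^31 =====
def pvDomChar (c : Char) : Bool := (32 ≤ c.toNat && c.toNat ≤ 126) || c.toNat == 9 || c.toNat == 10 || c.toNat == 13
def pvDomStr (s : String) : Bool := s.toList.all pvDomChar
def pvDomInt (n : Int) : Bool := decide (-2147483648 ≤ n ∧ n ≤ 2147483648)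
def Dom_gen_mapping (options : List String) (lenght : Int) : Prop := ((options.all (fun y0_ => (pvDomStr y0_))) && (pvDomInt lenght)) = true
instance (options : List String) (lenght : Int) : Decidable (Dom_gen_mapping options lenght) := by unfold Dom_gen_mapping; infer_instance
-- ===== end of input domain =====

-- B replaces A's recursion by an iterative loop expanding result = [[]] once per level (objective: simpler).
-- For lenght < 0 the Python A diverges (RecursionError): Pre_ requires 0 ≤ lenght.

-- ===== PORT A =====
-- A recurses on lenght - 1; modelled by structural recursion on the Nat value of lenght,
-- exact on Pre_ (0 ≤ lenght); on lenght < 0 Python A raises RecursionError.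
def gen_mapping_rec (options : List String) : Nat → List (List String)
  | 0 => [[]]
  | n + 1 =>
    let shorter := gen_mapping_rec options n
    options.foldl (fun out opt =>
      shorter.foldl (fun out s => out ++ [opt :: s]) out) []

def gen_mapping (options : List String) (lenght : Int) : List (List String) :=
  gen_mapping_rec options lenght.toNat

-- ===== PORT B =====
def gen_mapping_alt (options : List String) (lenght : Int) : List (List String) :=
  (PySem.List.pyRange 0 lenght 1).foldl
    (fun result _ => options.flatMap (fun opt => result.map (fun s => opt :: s)))
    [[]]

-- ===== PRECONDITION & SPEC =====
-- Pre_ excludes lenght < 0, where Python A raises RecursionError (no return value).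
def Pre_gen_mapping (options : List String) (lenght : Int) : Prop := 0 ≤ lenght
instance (options : List String) (lenght : Int) : Decidable (Pre_gen_mapping options lenght) := by unfold Pre_gen_mapping; infer_instance

def pvWitness_gen_mapping : List String × Int := (["a", "b"], 2)

def Spec_gen_mapping (options : List String) (lenght : Int) (out : List (List String)) : Prop := out = gen_mapping_alt options lenght
instance (options : List String) (lenght : Int) (out : List (List String)) : Decidable (Spec_gen_mapping options lenght out) := by unfold Spec_gen_mapping; infer_instance

-- ===== CLAIM (what is proved, stated in full; the proofs are below) =====
def Claim_equal_gen_mapping : Prop := ∀ (options : List String) (lenght : Int), Dom_gen_mapping options lenght → Pre_gen_mapping options lenght → Spec_gen_mapping options lenght (gen_mapping options lenght)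

-- ===== LEMMAS AND PROOFS =====

-- A's inner loop: appending one-element lists equals map.
theorem foldl_append_singleton {α β : Type} (f : α → β) (l : List α) (acc : List β) :
    l.foldl (fun out s => out ++ [f s]) acc = acc ++ l.map f := by
  induction l generalizing acc with
  | nil => simp
  | cons x xs ih => simp [List.foldl, ih]

-- A's outer loop equals flatMap.
theorem foldl_outer_flatMap (shorter : List (List String)) (l : List String)
    (acc : List (List String)) :
    l.foldl (fun out opt => shorter.foldl (fun out s => out ++ [opt :: s]) out) acc
      = acc ++ l.flatMap (fun opt => shorter.map (fun s => opt :: s)) := by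
  induction l generalizing acc with
  | nil => simp
  | cons x xs ih =>
    simp only [List.foldl]
    rw [foldl_append_singleton, ih, List.flatMap_cons, List.append_assoc]

-- one level of A equals one step of B
theorem gen_mapping_rec_succ (options : List String) (n : Nat) :
    gen_mapping_rec options (n + 1)
      = options.flatMap (fun opt => (gen_mapping_rec options n).map (fun s => opt :: s)) := by
  show options.foldl _ [] = _
  rw [foldl_outer_flatMap, List.nil_append]

-- B's loop, starting at level k, ends at level k + length of the remaining iteration list.
theorem foldl_step_rec (options : List String) (l : List Int) (k : Nat) :
    l.foldl (fun result _ => options.flatMap (fun opt => result.map (fun s => opt :: s)))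
        (gen_mapping_rec options k)
      = gen_mapping_rec options (k + l.length) := by
  induction l generalizing k with
  | nil => simp
  | cons x xs ih =>
    simp only [List.foldl, List.length_cons]
    rw [← gen_mapping_rec_succ, ih]
    ring_nf

-- ===== VERDICT (by name: the statement is the Claim_ definition above) =====
theorem gen_mapping_spec : Claim_equal_gen_mapping := by
  intro options lenght _ hpre
  unfold Spec_gen_mapping gen_mapping gen_mapping_alt
  have h0 : gen_mapping_rec options 0 = [[]] := rfl
  rw [← h0, foldl_step_rec]
  simp [PySem.List.length_pyRange_one]
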